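-- pv_equiv track=rewrite | github.com/aboutcode-org/purldb | minecode/miners/bitbucket.py | get_repo_ns_name
-- ===== SOURCE A (Python) =====
-- def get_repo_ns_name(url_like):
--     """
--     Return a namespace and name for a bitbucket repo given something that looks
--     like a bitbucket URL.
--
--     For example:
--     >>> get_repo_ns_name('https://api.bitbucket.org/2.0/repositories/bastiand/mercurialeclipse/refs/tags?pagelen=2')
--     ('bastiand', 'mercurialeclipse')
--     >>> get_repo_ns_name('https://bitbucket.org/bastiand/mercurialeclipse/src')
--     ('bastiand', 'mercurialeclipse')
--     >>> get_repo_ns_name('/bastiand/mercurialeclipse/src')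
--     ('bastiand', 'mercurialeclipse')
--     """
--     if url_like.startswith("https://api.bitbucket.org"):
--         head, _, path = url_like.partition("2.0/repositories")
--         if head:
--             segments = [p for p in path.split("/") if p]
--             if len(segments) >= 2:
--                 ns = segments[0]
--                 name = segments[1]
--                 return ns, name
--
--     if url_like.startswith("https://bitbucket.org/"):
--         head, _, path = url_like.partition("bitbucket.org/")
--         if head:
--             segments = [p for p in path.split("/") if p]
--             if len(segments) >= 2:
--                 ns = segments[0]
--                 name = segments[1]
--                 return ns, name
--
--     segments = [p for p in url_like.strip("/").split("/") if p]
--     if len(segments) >= 2: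
--         ns = segments[0]
--         name = segments[1]
--         return ns, name
-- ===== SOURCE B (Python) =====
-- def get_repo_ns_name(url_like):
--     """
--     Return a namespace and name for a bitbucket repo given something that looks
--     like a bitbucket URL.
--     """
--
--     def first_two(s, i):
--         # index-based scanner: extract the first two nonempty '/'-separated
--         # tokens of s[i:] without building any intermediate list
--         n = len(s)
--         while i < n and s[i] == "/":
--             i += 1
--         j = i
--         while j < n and s[j] != "/":
--             j += 1
--         if j == i:
--             return None
--         ns = s[i:j]
--         while j < n and s[j] == "/":
--             j += 1
--         k = j
--         while k < n and s[k] != "/":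
--             k += 1
--         if k == j:
--             return None
--         return ns, s[j:k]
--
--     start = 0
--     if url_like.startswith("https://api.bitbucket.org"):
--         marker = "2.0/repositories"
--         i = url_like.find(marker)
--         start = len(url_like) if i < 0 else i + len(marker)
--     elif url_like.startswith("https://bitbucket.org/"):
--         start = len("https://bitbucket.org/")
--     if start:
--         r = first_two(url_like, start)
--         if r is not None:
--             return r
--     return first_two(url_like, 0)
-- ===== Notes on version B (the rewrite author's own statement) =====
-- stated objective: alternative
-- what changed: A runs up to three separate partition/split/filter/index blocks that each build a segment list; B instead computes a single numeric cut offset (find-based for the api prefix, the constant prefix length otherwise) and uses one index-based two-pointer scanner that extracts the first two nonempty slash-separated tokens in place, with no intermediate lists, falling back to scanning the whole string.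
import Mathlib
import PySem

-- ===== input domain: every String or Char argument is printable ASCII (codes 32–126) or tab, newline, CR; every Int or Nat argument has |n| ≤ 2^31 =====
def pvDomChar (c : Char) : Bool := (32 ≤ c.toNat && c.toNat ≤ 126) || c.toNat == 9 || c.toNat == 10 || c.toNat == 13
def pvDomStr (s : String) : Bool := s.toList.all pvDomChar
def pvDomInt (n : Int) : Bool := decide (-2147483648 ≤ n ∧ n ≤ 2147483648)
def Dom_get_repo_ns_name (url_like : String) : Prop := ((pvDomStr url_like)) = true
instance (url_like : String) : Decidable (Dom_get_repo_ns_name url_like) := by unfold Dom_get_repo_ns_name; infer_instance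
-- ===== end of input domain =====

-- B replaces A's three split/filter/index extraction blocks by a numeric cut offset plus a
-- single two-pointer scanner that reads the first two '/'-separated tokens in place
-- (objective: alternative — no intermediate segment lists are built).

-- ===== PORT A =====

-- A-side helper: Python's str.partition(sep) for nonempty sep, on code points
-- (exact: (s[:i], sep, s[i+len(sep):]) at the first occurrence i, else (s, '', ''))
def pyPartition (s sep : List Char) : List Char × List Char × List Char :=
  let i := PySem.Chars.find s sep
  if i = -1 then (s, [], [])
  else (s.take i.toNat, sep, s.drop (i.toNat + sep.length))

-- A-side helper: '[p for p in path.split("/") if p]'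
def slashSegs (s : List Char) : List String :=
  ((PySem.Chars.splitOn s ['/']).map (fun cs => String.ofList cs)).filter (fun p => p ≠ "")

def get_repo_ns_name (url_like : String) : Option (String × String) :=
  let r1 : Option (String × String) :=
    if PySem.Str.startswith url_like "https://api.bitbucket.org" then
      let p := pyPartition url_like.toList "2.0/repositories".toList
      if p.1 ≠ [] then
        let segments := slashSegs p.2.2
        if 2 ≤ segments.length then
          some (PySem.List.pyGetD segments 0 "", PySem.List.pyGetD segments 1 "")
        else none
      else none
    else none
  match r1 with
  | some r => some r
  | none =>
    let r2 : Option (String × String) :=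
      if PySem.Str.startswith url_like "https://bitbucket.org/" then
        let p := pyPartition url_like.toList "bitbucket.org/".toList
        if p.1 ≠ [] then
          let segments := slashSegs p.2.2
          if 2 ≤ segments.length then
            some (PySem.List.pyGetD segments 0 "", PySem.List.pyGetD segments 1 "")
          else none
        else none
      else none
    match r2 with
    | some r => some r
    | none =>
      let segments := slashSegs (PySem.Chars.stripChars url_like.toList ['/'])
      if 2 ≤ segments.length then
        some (PySem.List.pyGetD segments 0 "", PySem.List.pyGetD segments 1 "")
      else none

-- ===== PORT B =====

-- Source B's first_two(s, i): an index scanner over s[i:] — here the suffix list; the four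
-- while loops are the four dropWhile/takeWhile passes, the slices s[i:j], s[j:k] the tokens
def firstTwo (cs : List Char) : Option (String × String) :=
  let cs1 := cs.dropWhile (· == '/')          -- while i < n and s[i] == '/'
  let t1 := cs1.takeWhile (· != '/')          -- while j < n and s[j] != '/'; ns = s[i:j]
  if t1 = [] then none                        -- if j == i: return None
  else
    let cs2 := (cs1.dropWhile (· != '/')).dropWhile (· == '/')   -- while s[j] == '/'
    let t2 := cs2.takeWhile (· != '/')        -- while k < n and s[k] != '/'
    if t2 = [] then none                      -- if k == j: return None
    else some (String.ofList t1, String.ofList t2)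

def get_repo_ns_name_alt (url_like : String) : Option (String × String) :=
  let start : Int :=
    if PySem.Str.startswith url_like "https://api.bitbucket.org" then
      let i := PySem.Chars.find url_like.toList "2.0/repositories".toList
      if i < 0 then (url_like.toList.length : Int) else i + 16
    else if PySem.Str.startswith url_like "https://bitbucket.org/" then 22
    else 0
  if start ≠ 0 then
    match firstTwo (url_like.toList.drop start.toNat) with
    | some r => some r
    | none => firstTwo url_like.toList
  else firstTwo url_like.toList

-- ===== PRECONDITION & SPEC =====
def Spec_get_repo_ns_name (url_like : String) (out : Option (String × String)) : Prop := out = get_repo_ns_name_alt url_like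
instance (url_like : String) (out : Option (String × String)) : Decidable (Spec_get_repo_ns_name url_like out) := by unfold Spec_get_repo_ns_name; infer_instance

-- ===== CLAIM (what is proved, stated in full; the proofs are below) =====
def Claim_equal_get_repo_ns_name : Prop := ∀ (url_like : String), Dom_get_repo_ns_name url_like → Spec_get_repo_ns_name url_like (get_repo_ns_name url_like)

-- ===== LEMMAS AND PROOFS =====

theorem drop_head_ne (cs : List Char) (a : Char) (t : List Char)
    (he : cs.dropWhile (· == '/') = a :: t) : (a == '/') = false := by
  have hne : cs.dropWhile (· == '/') ≠ [] := by simp [he]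
  have hd := List.head_dropWhile_not (· == '/') hne
  have hh : (cs.dropWhile (· == '/')).head hne = a := by simp [he]
  rwa [hh] at hd

theorem drop_head_ne' (cs : List Char) (a : Char) (t : List Char)
    (he : cs.dropWhile (· != '/') = a :: t) : a = '/' := by
  have hne : cs.dropWhile (· != '/') ≠ [] := by simp [he]
  have hd := List.head_dropWhile_not (· != '/') hne
  have hh : (cs.dropWhile (· != '/')).head hne = a := by simp [he]
  rw [hh] at hd; simpa using hd

def runs (cs : List Char) : List String :=
  let c1 := cs.dropWhile (· == '/')
  if _h : c1 = [] then []
  else String.ofList (c1.takeWhile (· != '/')) :: runs (c1.dropWhile (· != '/'))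
termination_by cs.length
decreasing_by
  rcases he : cs.dropWhile (· == '/') with _ | ⟨a, t⟩
  · exact absurd he _h
  · have ha : (a != '/') = true := by simpa using drop_head_ne cs a t he
    calc ((a :: t).dropWhile (· != '/')).length
        = (t.dropWhile (· != '/')).length := by simp [ha]
      _ ≤ t.length := List.length_dropWhile_le _ _
      _ < (a :: t).length := by simp
      _ ≤ cs.length := by rw [← he]; exact List.length_dropWhile_le _ _

def segsP (cs : List Char) : List String :=
  ((List.splitOnP (· == '/') cs).map (fun l => String.ofList l)).filter (fun p => p ≠ "")

theorem splitOnP_shape (cs : List Char) :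
    List.splitOnP (· == '/') cs
      = cs.takeWhile (· != '/') ::
        (match cs.dropWhile (· != '/') with
          | [] => []
          | _ :: r => List.splitOnP (· == '/') r) := by
  induction cs with
  | nil => simp [List.splitOnP_nil]
  | cons c rest ih =>
    by_cases hc : c = '/'
    · subst hc; simp [List.splitOnP_cons]
    · rw [List.splitOnP_cons, if_neg (by simp [hc]), ih]
      simp [hc]

theorem segsP_cons_slash (cs : List Char) : segsP ('/' :: cs) = segsP cs := by
  unfold segsP
  rw [List.splitOnP_cons, if_pos (by simp)]
  simp

theorem runs_cons_slash (cs : List Char) : runs ('/' :: cs) = runs cs := by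
  have h : ('/' :: cs).dropWhile (· == '/') = cs.dropWhile (· == '/') := by
    simp
  rw [runs]
  simp only [h]
  rw [← runs]

theorem segsP_eq_runs_aux (n : Nat) : ∀ (cs : List Char), cs.length ≤ n → segsP cs = runs cs := by
  induction n with
  | zero =>
    intro cs h
    have : cs = [] := by cases cs <;> simp_all
    subst this
    rw [runs]; simp [segsP, List.splitOnP_nil]
  | succ n ih =>
    intro cs hlen
    cases cs with
    | nil => rw [runs]; simp [segsP, List.splitOnP_nil]
    | cons c rest =>
      by_cases hc : c = '/'
      · subst hc
        rw [segsP_cons_slash, runs_cons_slash]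
        exact ih rest (by simpa using Nat.lt_succ_iff.mp (by simpa using hlen))
      · have hc1 : (c :: rest).dropWhile (· == '/') = c :: rest := by
          simp [hc]
        rw [runs]
        simp only [hc1]
        rw [dif_neg (by simp)]
        unfold segsP
        rw [splitOnP_shape]
        have htake : (c :: rest).takeWhile (· != '/') = c :: rest.takeWhile (· != '/') := by
          simp [hc]
        have hdrop : (c :: rest).dropWhile (· != '/') = rest.dropWhile (· != '/') := by
          simp [hc]
        rw [htake, hdrop]
        rcases hd : rest.dropWhile (· != '/') with _ | ⟨x, rr⟩
        · simp [runs]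
        · have hx : x = '/' := drop_head_ne' rest x rr hd
          subst hx
          have hrr : rr.length ≤ n := by
            have h1 : ('/' :: rr).length ≤ rest.length := by
              rw [← hd]; exact List.length_dropWhile_le _ _
            simp at h1 hlen; omega
          have : (List.filter (fun p => decide (p ≠ ""))
                    (List.map (fun l => String.ofList l) (List.splitOnP (· == '/') rr)))
                  = segsP rr := rfl
          simp only [List.map_cons, List.filter_cons]
          rw [if_pos (by simp)]
          rw [runs_cons_slash]
          congr 1
          exact ih rr hrr

theorem runs_nil_of_all_slash (sl : List Char) (h : ∀ x ∈ sl, x = '/') : runs sl = [] := by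
  rw [runs]
  rw [dif_pos]
  rw [List.dropWhile_eq_nil_iff]
  intro x hx
  simp [h x hx]

theorem runs_append_slashes_aux (n : Nat) : ∀ (xs sl : List Char), xs.length ≤ n →
    (∀ x ∈ sl, x = '/') → runs (xs ++ sl) = runs xs := by
  induction n with
  | zero =>
    intro xs sl hlen h
    have : xs = [] := by cases xs <;> simp_all
    subst this
    simp [runs_nil_of_all_slash sl h, runs]
  | succ n ih =>
    intro xs sl hlen h
    rcases hc1 : xs.dropWhile (· == '/') with _ | ⟨a, t⟩
    · -- xs is all slashes
      have hxs : ∀ x ∈ xs, x = '/' := by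
        intro x hx
        have := List.dropWhile_eq_nil_iff.mp hc1 x hx
        simpa using this
      have hall : ∀ x ∈ xs ++ sl, x = '/' := by
        intro x hx
        rcases List.mem_append.mp hx with h' | h'
        · exact hxs x h'
        · exact h x h'
      rw [runs_nil_of_all_slash _ hall, runs_nil_of_all_slash _ hxs]
    · have ha : (a == '/') = false := drop_head_ne xs a t hc1
      have hd1 : (xs ++ sl).dropWhile (· == '/') = (a :: t) ++ sl := by
        rw [List.dropWhile_append, hc1]
        simp
      -- unfold both sides once
      conv_lhs => rw [runs]
      conv_rhs => rw [runs]
      simp only [hd1, hc1]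
      rw [dif_neg (by simp), dif_neg (by simp)]
      have ha' : (a != '/') = true := by simpa using ha
      have htk : ((a :: t) ++ sl).takeWhile (· != '/') = (a :: t).takeWhile (· != '/') := by
        rw [List.takeWhile_append]
        split_ifs with hl
        · have : (a :: t).takeWhile (· != '/') = a :: t :=
            (List.takeWhile_prefix _).eq_of_length hl
          rw [this]
          have : sl.takeWhile (· != '/') = [] := by
            cases sl with
            | nil => simp
            | cons b u =>
              have hb : b = '/' := h b (by simp)
              subst hb
              simp
          simp [this]
        · rfl
      rw [htk]
      congr 1
      rw [List.dropWhile_append]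
      rcases hdd : (a :: t).dropWhile (· != '/') with _ | ⟨b, u⟩
      · simp only [List.isEmpty_nil, if_true]
        have hsl : sl.dropWhile (· != '/') = sl := by
          cases sl with
          | nil => rfl
          | cons b u =>
            have hb : b = '/' := h b (by simp)
            subst hb
            simp
        rw [hsl, runs_nil_of_all_slash sl h, runs]
        simp
      · simp only [List.isEmpty_cons]
        have hlen' : (b :: u).length ≤ n := by
          have h1 : (a :: t).dropWhile (· != '/') = t.dropWhile (· != '/') := by simp [ha']
          rw [h1] at hdd
          have h2 : (b :: u).length ≤ t.length := by
            rw [← hdd]; exact List.length_dropWhile_le _ _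
          have h3 : (a :: t).length ≤ xs.length := by
            rw [← hc1]; exact List.length_dropWhile_le _ _
          simp at h2 h3 ⊢
          omega
        exact ih (b :: u) sl hlen' h

theorem runs_dropWhile (cs : List Char) : runs (cs.dropWhile (· == '/')) = runs cs := by
  induction cs with
  | nil => rfl
  | cons c rest ih =>
    by_cases hc : c = '/'
    · subst hc
      rw [List.dropWhile_cons_of_pos (by simp), ih, runs_cons_slash]
    · rw [List.dropWhile_cons_of_neg (by simp [hc])]

theorem runs_strip (cs : List Char) :
    runs (PySem.Chars.stripChars cs ['/']) = runs cs := by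
  rw [PySem.Chars.stripChars]
  have hp : (fun c => List.contains ['/'] c) = (fun c : Char => c == '/') := by
    funext c
    show (c == '/' || false) = _
    simp
  simp only [hp]
  set s' := cs.dropWhile (· == '/') with hs'
  set strip := (List.dropWhile (fun c : Char => c == '/') s'.reverse).reverse with hstrip
  set sl := (List.takeWhile (fun c : Char => c == '/') s'.reverse).reverse with hsl
  have hdecomp : strip ++ sl = s' := by
    rw [hstrip, hsl, ← List.reverse_append, List.takeWhile_append_dropWhile, List.reverse_reverse]
  have hall : ∀ x ∈ sl, x = '/' := by
    intro x hx
    rw [hsl, List.mem_reverse] at hx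
    have := List.mem_takeWhile_imp hx
    simpa using this
  calc runs strip = runs (strip ++ sl) := (runs_append_slashes_aux strip.length strip sl le_rfl hall).symm
    _ = runs s' := by rw [hdecomp]
    _ = runs cs := runs_dropWhile cs

theorem takeWhile_ne_nil_of_cons (a : Char) (t : List Char) (ha : (a == '/') = false) :
    (a :: t).takeWhile (· != '/') ≠ [] := by
  simp [List.takeWhile_cons]
  simpa using ha

theorem firstTwo_eq (cs : List Char) :
    firstTwo cs = match runs cs with
      | a :: b :: _ => some (a, b)
      | _ => none := by
  unfold firstTwo
  rw [runs]
  rcases hc1 : cs.dropWhile (· == '/') with _ | ⟨a, t⟩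
  · simp
  · have ha := drop_head_ne cs a t hc1
    rw [if_neg (takeWhile_ne_nil_of_cons a t ha), dif_neg (by simp)]
    rw [runs]
    rcases hc2 : ((a :: t).dropWhile (· != '/')).dropWhile (· == '/') with _ | ⟨b, u⟩
    · simp
    · have hb := drop_head_ne _ b u hc2
      rw [if_neg (takeWhile_ne_nil_of_cons b u hb), dif_neg (by simp)]

theorem not_both_prefixes (u : String)
    (h1 : PySem.Str.startswith u "https://api.bitbucket.org" = true) :
    PySem.Str.startswith u "https://bitbucket.org/" = false := by
  by_contra h
  have h2 : PySem.Str.startswith u "https://bitbucket.org/" = true := by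
    revert h; cases PySem.Str.startswith u "https://bitbucket.org/" <;> simp
  have p1 : "https://api.bitbucket.org".toList <+: u.toList :=
    (PySem.Chars.startswith_iff _ _).mp (by simpa using h1)
  have p2 : "https://bitbucket.org/".toList <+: u.toList :=
    (PySem.Chars.startswith_iff _ _).mp (by simpa using h2)
  rcases List.prefix_or_prefix_of_prefix p1 p2 with hp | hp <;> revert hp <;> decide

theorem no_sub_prefix (X t : List Char) (h14 : 14 < X.length)
    (hfalse : ¬ "bitbucket.org/".toList <+: X)
    (hpre : "bitbucket.org/".toList <+: X ++ t) : False := by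
  rcases List.prefix_or_prefix_of_prefix hpre (List.prefix_append X t) with h1 | h1
  · exact hfalse h1
  · have hl := h1.length_le
    have : "bitbucket.org/".toList.length = 14 := by decide
    omega

theorem find_bb (u : String)
    (h : PySem.Str.startswith u "https://bitbucket.org/" = true) :
    PySem.Chars.find u.toList "bitbucket.org/".toList = 8 := by
  have p2 : "https://bitbucket.org/".toList <+: u.toList :=
    (PySem.Chars.startswith_iff _ _).mp (by simpa using h)
  rcases p2 with ⟨t, ht⟩
  have h22 : "https://bitbucket.org/".toList
      = "https://".toList ++ "bitbucket.org/".toList := by decide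
  have hdrop8 : (u.toList).drop 8 = "bitbucket.org/".toList ++ t := by
    rw [← ht, h22, List.append_assoc, List.drop_append_of_le_length (by decide)]
    have : List.drop 8 "https://".toList = [] := by decide
    rw [this, List.nil_append]
  have hat8 : "bitbucket.org/".toList <+: (u.toList).drop 8 := by
    rw [hdrop8]; exact List.prefix_append _ _
  have hnbefore : ∀ i < 8, ¬ "bitbucket.org/".toList <+: (u.toList).drop i := by
    intro i hi hpre
    have hle : i ≤ "https://bitbucket.org/".toList.length := by
      have : "https://bitbucket.org/".toList.length = 22 := by decide
      omega
    have hdropi : (u.toList).drop i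
        = "https://bitbucket.org/".toList.drop i ++ t := by
      rw [← ht, List.drop_append_of_le_length hle]
    rw [hdropi] at hpre
    interval_cases i <;>
      exact no_sub_prefix _ t (by decide) (by decide) hpre
  have hin : PySem.Chars.isIn "bitbucket.org/".toList u.toList = true :=
    (PySem.Chars.exists_prefix_drop_iff_isIn _ _).mp ⟨8, hat8⟩
  have hne : PySem.Chars.find u.toList "bitbucket.org/".toList ≠ -1 :=
    (PySem.Chars.find_ne_neg_one_iff _ _).mpr ((PySem.Chars.isIn_iff_infix _ _).mp hin)
  have h0 : 0 ≤ PySem.Chars.find u.toList "bitbucket.org/".toList := by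
    have := PySem.Chars.neg_one_le_find (s := u.toList) (sub := "bitbucket.org/".toList)
    omega
  obtain ⟨hfound, hmin⟩ := PySem.Chars.find_spec (s := u.toList) (sub := "bitbucket.org/".toList) h0
  set k := (PySem.Chars.find u.toList "bitbucket.org/".toList).toNat with hk
  have hk8 : k = 8 := by
    by_contra hne8
    rcases Nat.lt_or_ge k 8 with hlt | hge
    · exact hnbefore k hlt hfound
    · have : 8 < k := by omega
      exact hmin 8 this hat8
  omega

-- If u starts with prefix p and p's first char differs from sep's first char, then the
-- partition head is nonempty (so A's 'if head:' guard is always true in its branches).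
theorem pyPartition_head_ne (u p sep : List Char) (c d : Char)
    (hc : p.head? = some c) (hd : sep.head? = some d) (hcd : c ≠ d)
    (h : p <+: u) : (pyPartition u sep).1 ≠ [] := by
  unfold pyPartition
  have hpne : p ≠ [] := by intro h0; simp [h0] at hc
  have hune : u ≠ [] := by
    intro h0; subst h0; exact hpne (List.prefix_nil.mp h)
  by_cases hf : PySem.Chars.find u sep = -1
  · simpa [hf] using hune
  · have h0 : 0 ≤ PySem.Chars.find u sep := by
      have := PySem.Chars.neg_one_le_find (s := u) (sub := sep); omega
    simp only [hf, if_false]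
    intro htake
    have hi0 : (PySem.Chars.find u sep).toNat = 0 := by
      rcases List.take_eq_nil_iff.mp htake with h' | h'
      · exact h'
      · exact absurd h' hune
    have hspec := (PySem.Chars.find_spec (s := u) (sub := sep) h0).1
    rw [hi0, List.drop_zero] at hspec
    have h1 : u.head? = some c := by
      rcases h with ⟨t, rfl⟩
      cases p with
      | nil => simp at hc
      | cons a l => simp at hc ⊢; simpa using hc
    have h2 : u.head? = some d := by
      rcases hspec with ⟨t, rfl⟩
      cases sep with
      | nil => simp at hd
      | cons a l => simp at hd ⊢; simpa using hd
    rw [h1] at h2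
    exact hcd (Option.some.injEq .. ▸ h2)

theorem head_ne_api (u : String)
    (h : PySem.Str.startswith u "https://api.bitbucket.org" = true) :
    (pyPartition u.toList "2.0/repositories".toList).1 ≠ [] := by
  apply pyPartition_head_ne u.toList "https://api.bitbucket.org".toList
    "2.0/repositories".toList 'h' '2' rfl rfl (by decide)
  exact (PySem.Chars.startswith_iff _ _).mp (by simpa using h)

theorem head_ne_bb (u : String)
    (h : PySem.Str.startswith u "https://bitbucket.org/" = true) :
    (pyPartition u.toList "bitbucket.org/".toList).1 ≠ [] := by
  apply pyPartition_head_ne u.toList "https://bitbucket.org/".toList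
    "bitbucket.org/".toList 'h' 'b' rfl rfl (by decide)
  exact (PySem.Chars.startswith_iff _ _).mp (by simpa using h)


theorem splitOn_go_eq (fuel : Nat) (l cur : List Char) (acc : List (List Char)) (hf : l.length < fuel) :
    PySem.Chars.splitOn.go ['/'] fuel l cur acc
      = acc.reverse ++ (List.splitOnP (· == '/') l).modifyHead (cur.reverse ++ ·) := by
  induction fuel generalizing l cur acc with
  | zero => omega
  | succ f ih =>
    cases l with
    | nil => simp [PySem.Chars.splitOn.go, List.splitOnP_nil]
    | cons c rest =>
      have hr : rest.length < f := by simp at hf; omega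
      rw [PySem.Chars.splitOn.go]
      simp only [List.isPrefixOf, List.splitOnP_cons]
      by_cases hc : c = '/'
      · subst hc
        rw [if_pos (by simp), if_pos (by simp), ih _ _ _ (by simpa using hr)]
        rcases List.exists_cons_of_ne_nil (List.splitOnP_ne_nil (· == '/') rest) with ⟨h, t, he⟩
        simp [he]
      · rw [if_neg (by simp [Ne.symm hc]), if_neg (by simp [hc]), ih _ _ _ hr,
          List.modifyHead_modifyHead]
        rcases List.exists_cons_of_ne_nil (List.splitOnP_ne_nil (· == '/') rest) with ⟨h, t, he⟩
        simp [he]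

theorem splitOn_eq_splitOnP (cs : List Char) :
    PySem.Chars.splitOn cs ['/'] = List.splitOnP (· == '/') cs := by
  rw [PySem.Chars.splitOn, splitOn_go_eq _ _ _ _ (by omega)]
  rcases List.exists_cons_of_ne_nil (List.splitOnP_ne_nil (· == '/') cs) with ⟨h, t, he⟩
  simp [he]

theorem slashSegs_eq_runs (cs : List Char) : slashSegs cs = runs cs := by
  have : slashSegs cs = segsP cs := by
    unfold slashSegs segsP
    rw [splitOn_eq_splitOnP]
  rw [this]
  exact segsP_eq_runs_aux cs.length cs le_rfl

theorem firstTwo_strip (cs : List Char) :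
    firstTwo (PySem.Chars.stripChars cs ['/']) = firstTwo cs := by
  rw [firstTwo_eq, firstTwo_eq, runs_strip]

theorem extract_eq (path : List Char) :
    (if 2 ≤ (slashSegs path).length then
       some (PySem.List.pyGetD (slashSegs path) 0 "", PySem.List.pyGetD (slashSegs path) 1 "")
     else none) = firstTwo path := by
  rw [slashSegs_eq_runs, firstTwo_eq]
  rcases hr : runs path with _ | ⟨a, _ | ⟨b, r⟩⟩
  · simp
  · simp
  · rw [if_pos (by simp)]
    have h0 : PySem.List.pyGetD (a :: b :: r) (0 : Int) "" = a := by
      simp [pysem]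
    have h1 : PySem.List.pyGetD (a :: b :: r) (1 : Int) "" = b := by
      simp [pysem]
    rw [h0, h1]

-- ===== VERDICT (by name: the statement is the Claim_ definition above) =====
theorem get_repo_ns_name_spec : Claim_equal_get_repo_ns_name := by
  intro u _
  unfold Spec_get_repo_ns_name get_repo_ns_name get_repo_ns_name_alt
  by_cases h1 : PySem.Str.startswith u "https://api.bitbucket.org" = true
  · have h2 := not_both_prefixes u h1
    have hhead := head_ne_api u h1
    have hlen25 : 25 ≤ u.toList.length := by
      have p1 : "https://api.bitbucket.org".toList <+: u.toList :=
        (PySem.Chars.startswith_iff _ _).mp (by simpa using h1)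
      have hle := p1.length_le
      have h25 : "https://api.bitbucket.org".toList.length = 25 := by decide
      omega
    simp only [h1, h2, if_true, Bool.false_eq_true, if_false,
      if_pos hhead, extract_eq, firstTwo_strip]
    unfold pyPartition
    have hlen16 : "2.0/repositories".toList.length = 16 := by decide
    by_cases hi : PySem.Chars.find u.toList "2.0/repositories".toList = -1
    · have hi' : PySem.Chars.find u.toList "2.0/repositories".toList < 0 := by omega
      have hstart : ((u.toList.length : Int) ≠ 0) := by omega
      have hdrop : List.drop (Int.toNat (u.toList.length : Int)) u.toList = [] := by simp
      rw [hi]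
      rw [if_pos (show (-1 : Int) = -1 from rfl), if_pos (show (-1 : Int) < 0 by norm_num)]
      rw [if_pos hstart, hdrop]
    · have h0 : 0 ≤ PySem.Chars.find u.toList "2.0/repositories".toList := by
        have := PySem.Chars.neg_one_le_find (s := u.toList) (sub := "2.0/repositories".toList)
        omega
      have hi' : ¬ PySem.Chars.find u.toList "2.0/repositories".toList < 0 := by omega
      have hstart : ((PySem.Chars.find u.toList "2.0/repositories".toList + 16 : Int) ≠ 0) := by omega
      have htn : (PySem.Chars.find u.toList "2.0/repositories".toList + 16).toNat
          = (PySem.Chars.find u.toList "2.0/repositories".toList).toNat + 16 := by omega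
      simp only [hi, if_neg hi', hlen16]
      rw [if_pos hstart, htn]
      norm_num
  · have h1' : PySem.Str.startswith u "https://api.bitbucket.org" = false := by
      revert h1; cases PySem.Str.startswith u "https://api.bitbucket.org" <;> simp
    by_cases h2 : PySem.Str.startswith u "https://bitbucket.org/" = true
    · have hhead := head_ne_bb u h2
      have hfind := find_bb u h2
      simp only [h1', h2, Bool.false_eq_true, if_false, if_true,
        if_pos hhead, extract_eq, firstTwo_strip]
      unfold pyPartition
      rw [hfind]
      have hlen14 : "bitbucket.org/".toList.length = 14 := by decide
      simp only [hlen14]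
      rw [if_neg (by norm_num)]
      have h22 : ((8 : Int).toNat + 14) = 22 := by decide
      rw [h22]
      rw [if_pos (by norm_num : (22 : Int) ≠ 0), show Int.toNat 22 = 22 from rfl]
    · have h2' : PySem.Str.startswith u "https://bitbucket.org/" = false := by
        revert h2; cases PySem.Str.startswith u "https://bitbucket.org/" <;> simp
      simp only [h1', h2', Bool.false_eq_true, if_false, extract_eq, firstTwo_strip]
      rw [if_neg (by norm_num : ¬ ((0 : Int) ≠ 0))]
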